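-- pv_equiv track=rewrite | github.com/LiJinHao999/astrbot_plugin_streamify_router | fc_enhance.py | _trim_messages_by_turns
-- ===== SOURCE A (Python) =====
-- from typing import Any, Dict, List, Optional, Pattern, Tuple
--
-- def _trim_messages_by_turns(
--     messages: List[Dict[str, Any]], turns: int, user_role: str = "user"
-- ) -> List[Dict[str, Any]]:
--     """保留最近 N 轮对话（每轮以 user 消息为起点）。turns=0 不传入对话。"""
--     if not messages:
--         return messages
--     if turns == 0:
--         return []
--     if turns < 0:
--         return messages
--     count = 0
--     cut = 0
--     for i in range(len(messages) - 1, -1, -1):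
--         if isinstance(messages[i], dict) and messages[i].get("role") == user_role:
--             count += 1
--             if count >= turns:
--                 cut = i
--                 break
--     return messages[cut:]
-- ===== SOURCE B (Python) =====
-- def _trim_messages_by_turns(messages, turns, user_role="user"):
--     """保留最近 N 轮对话（每轮以 user 消息为起点）。turns=0 不传入对话。"""
--     if not messages:
--         return messages
--     if turns == 0:
--         return []
--     if turns < 0:
--         return messages
--     user_indices = []
--     for i, m in enumerate(messages):
--         if isinstance(m, dict) and m.get("role") == user_role:
--             user_indices.append(i)
--     cut = user_indices[-turns] if len(user_indices) >= turns else 0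
--     return messages[cut:]
-- ===== Notes on version B (the rewrite author's own statement) =====
-- stated objective: alternative
-- what changed: Replaces A's backward scan with an early break by a single forward pass that collects all user-message indices and then selects the turns-th-from-the-end index by direct negative indexing.
import Mathlib
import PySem

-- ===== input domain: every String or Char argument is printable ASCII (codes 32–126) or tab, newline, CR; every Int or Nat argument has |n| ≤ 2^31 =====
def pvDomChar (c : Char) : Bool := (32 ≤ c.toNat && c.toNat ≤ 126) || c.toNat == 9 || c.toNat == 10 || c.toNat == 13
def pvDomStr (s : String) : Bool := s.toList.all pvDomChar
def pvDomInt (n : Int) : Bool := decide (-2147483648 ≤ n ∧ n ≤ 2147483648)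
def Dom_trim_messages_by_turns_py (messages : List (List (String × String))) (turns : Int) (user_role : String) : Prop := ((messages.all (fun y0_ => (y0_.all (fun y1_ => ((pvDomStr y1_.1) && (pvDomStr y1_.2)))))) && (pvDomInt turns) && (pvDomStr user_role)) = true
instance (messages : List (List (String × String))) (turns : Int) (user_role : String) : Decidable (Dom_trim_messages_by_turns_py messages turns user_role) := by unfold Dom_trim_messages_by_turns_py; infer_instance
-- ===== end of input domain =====

-- ===== PORT A =====
-- B replaces A's backward scan-with-break by a forward index-collection pass; alternative decomposition, same cost.
-- shared helper: 'isinstance(m, dict) and m.get("role") == user_role' (isinstance is identically true under the type convention)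
def pvIsUser (m : List (String × String)) (user_role : String) : Bool :=
  (PySem.Dict.mk m).get? "role" == some user_role

-- A's loop 'for i in range(len(messages)-1, -1, -1)' with break: fuel n+1 means current index n
def pvAGo (messages : List (List (String × String))) (user_role : String) (turns : Int) (count : Int) : Nat → Int
  | 0 => 0
  | n + 1 =>
    if (messages[n]?.any (fun m => pvIsUser m user_role)) then
      (if count + 1 ≥ turns then (n : Int) else pvAGo messages user_role turns (count + 1) n)
    else pvAGo messages user_role turns count n

def trim_messages_by_turns_py (messages : List (List (String × String))) (turns : Int) (user_role : String) : List (List (String × String)) :=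
  if messages = [] then messages
  else if turns = 0 then []
  else if turns < 0 then messages
  else PySem.List.slice messages (some (pvAGo messages user_role turns 0 messages.length)) none

-- ===== PORT B =====
-- forward pass building the list of user-message indices (the append loop, built front-to-back)
def pvUserIndices (user_role : String) : List (List (String × String)) → Nat → List Int
  | [], _ => []
  | m :: rest, i =>
    if pvIsUser m user_role then (i : Int) :: pvUserIndices user_role rest (i + 1)
    else pvUserIndices user_role rest (i + 1)

def trim_messages_by_turns_py_alt (messages : List (List (String × String))) (turns : Int) (user_role : String) : List (List (String × String)) :=
  if messages = [] then messages
  else if turns = 0 then []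
  else if turns < 0 then messages
  else
    let u := pvUserIndices user_role messages 0
    -- 'user_indices[-turns] if len(user_indices) >= turns else 0'; getD 0 only discharges the Option
    -- (pyGet? is some whenever the guard holds)
    let cut : Int := if (u.length : Int) ≥ turns then (PySem.List.pyGet? u (-turns)).getD 0 else 0
    PySem.List.slice messages (some cut) none

-- ===== PRECONDITION & SPEC =====
def Spec_trim_messages_by_turns_py (messages : List (List (String × String))) (turns : Int) (user_role : String) (out : List (List (String × String))) : Prop := out = trim_messages_by_turns_py_alt messages turns user_role
instance (messages : List (List (String × String))) (turns : Int) (user_role : String) (out : List (List (String × String))) : Decidable (Spec_trim_messages_by_turns_py messages turns user_role out) := by unfold Spec_trim_messages_by_turns_py; infer_instance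

-- ===== CLAIM (what is proved, stated in full; the proofs are below) =====
def Claim_equal_trim_messages_by_turns_py : Prop := ∀ (messages : List (List (String × String))) (turns : Int) (user_role : String), Dom_trim_messages_by_turns_py messages turns user_role → Spec_trim_messages_by_turns_py messages turns user_role (trim_messages_by_turns_py messages turns user_role)

-- ===== LEMMAS AND PROOFS =====

lemma pvUserIndices_append (user_role : String) (ys : List (List (String × String))) (x : List (String × String)) (k : Nat) :
    pvUserIndices user_role (ys ++ [x]) k =
      pvUserIndices user_role ys k ++ (if pvIsUser x user_role then [((k + ys.length : Nat) : Int)] else []) := by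
  induction ys generalizing k with
  | nil => simp [pvUserIndices]
  | cons m rest ih =>
    simp only [List.cons_append, pvUserIndices, ih (k + 1), List.length_cons]
    split_ifs <;> simp <;> ring_nf

-- pvAGo only inspects indices below its fuel, so a trailing element is invisible
lemma pvAGo_append (user_role : String) (turns : Int) (ys : List (List (String × String))) (x : List (String × String)) :
    ∀ (n : Nat), n ≤ ys.length → ∀ (c : Int),
      pvAGo (ys ++ [x]) user_role turns c n = pvAGo ys user_role turns c n := by
  intro n
  induction n with
  | zero => intro _ c; rfl
  | succ m ih =>
    intro hm c
    have hget : (ys ++ [x])[m]? = ys[m]? := List.getElem?_append_left (by omega)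
    simp only [pvAGo, hget, ih (by omega)]

lemma pvAGo_eq (user_role : String) (turns : Int) (msgs : List (List (String × String))) :
    ∀ (c : Int), c < turns →
    pvAGo msgs user_role turns c msgs.length =
      (let u := pvUserIndices user_role msgs 0
       if (u.length : Int) + c ≥ turns then (u[u.length - (turns - c).toNat]?).getD 0 else 0) := by
  induction msgs using List.reverseRecOn with
  | nil =>
    intro c hc
    simp only [pvUserIndices, List.length_nil, pvAGo]
    simp only [Nat.cast_zero, zero_add]
    rw [if_neg (by omega)]
  | append_singleton ys x ih =>
    intro c hc
    have hlen : (ys ++ [x]).length = ys.length + 1 := by simp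
    rw [hlen]
    have hget : (ys ++ [x])[ys.length]? = some x := by simp
    simp only [pvAGo, hget, Option.any_some]
    rw [pvUserIndices_append]
    cases hu : pvIsUser x user_role with
    | true =>
      simp only [if_true]
      by_cases hbrk : c + 1 ≥ turns
      · rw [if_pos hbrk]
        have hlen2 : (pvUserIndices user_role ys 0 ++ [((0 + ys.length : Nat) : Int)]).length
            = (pvUserIndices user_role ys 0).length + 1 := by simp
        simp only [hlen2]
        rw [if_pos (by push_cast; omega)]
        have hidx : (pvUserIndices user_role ys 0).length + 1 - (turns - c).toNat
            = (pvUserIndices user_role ys 0).length := by omega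
        rw [hidx, List.getElem?_append_right (by omega)]
        simp
      · rw [if_neg hbrk, pvAGo_append user_role turns ys x ys.length (le_refl _) (c + 1),
            ih (c + 1) (by omega)]
        simp only []
        have hlen2 : (pvUserIndices user_role ys 0 ++ [((0 + ys.length : Nat) : Int)]).length
            = (pvUserIndices user_role ys 0).length + 1 := by simp
        rw [hlen2]
        set u' := pvUserIndices user_role ys 0 with hu'
        by_cases hcond : (u'.length : Int) + (c + 1) ≥ turns
        · rw [if_pos hcond, if_pos (by push_cast; push_cast at hcond; omega)]
          have hidx : u'.length + 1 - (turns - c).toNat = u'.length - (turns - (c + 1)).toNat := by omega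
          rw [hidx]
          rw [List.getElem?_append_left (by omega)]
        · rw [if_neg hcond, if_neg (by push_cast; push_cast at hcond; omega)]
    | false =>
      simp only [Bool.false_eq_true, if_false, List.append_nil]
      rw [pvAGo_append user_role turns ys x ys.length (le_refl _) c]
      exact ih c hc

-- ===== VERDICT (by name: the statement is the Claim_ definition above) =====
theorem trim_messages_by_turns_py_spec : Claim_equal_trim_messages_by_turns_py := by
  intro messages turns user_role _
  unfold Spec_trim_messages_by_turns_py trim_messages_by_turns_py trim_messages_by_turns_py_alt
  by_cases h0 : messages = []
  · simp [h0]
  · rw [if_neg h0, if_neg h0]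
    by_cases h1 : turns = 0
    · simp [h1]
    · rw [if_neg h1, if_neg h1]
      by_cases h2 : turns < 0
      · simp [h2]
      · rw [if_neg h2, if_neg h2]
        have hpos : 0 < turns := by omega
        simp only []
        congr 2
        rw [pvAGo_eq user_role turns messages 0 hpos]
        set u := pvUserIndices user_role messages 0 with hu
        simp only []
        have hsub : turns - 0 = turns := by ring
        by_cases hc : (u.length : Int) ≥ turns
        · rw [if_pos (by omega), if_pos hc, hsub]
          have hpy : PySem.List.pyGet? u (-turns) = u[u.length - turns.toNat]? := by
            have hT : -turns = -((turns.toNat : Nat) : Int) := by omega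
            rw [hT, PySem.List.pyGet?_neg_natCast u turns.toNat (by omega) (by omega)]
          rw [hpy]
        · rw [if_neg (by omega), if_neg hc]
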